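-- pv_equiv track=rewrite | github.com/awnonbhowmik/ElGamal | main.py | cyc_group_gen
-- ===== SOURCE A (Python) =====
-- def cyc_group_gen(g, p):
--     E = []
--     """create empty set"""
--     my_set = set(E)
--
--     for i in range(1, p):
--         num = pow(g, i, p)
--         my_set.add(num)
--     return len(my_set)
-- ===== SOURCE B (Python) =====
-- def cyc_group_gen(g, p):
--     # Incremental multiply with early-exit cycle detection: once a value of the
--     # orbit 1 -> g -> g^2 -> ... (mod p) repeats, all later powers repeat too,
--     # so we can stop instead of enumerating all p-1 powers via pow().
--     cur = 1
--     seen = set()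
--     for _ in range(1, p):
--         cur = cur * g % p
--         if cur in seen:
--             break
--         seen.add(cur)
--     return len(seen)
-- ===== Notes on version B (the rewrite author's own statement) =====
-- stated objective: faster
-- what changed: Instead of computing pow(g,i,p) independently for every i in 1..p-1 and collecting all p-1 results in a set, B iterates cur = cur*g % p once per step and breaks out of the loop at the first repeated orbit value, since from the first repeat the orbit is periodic and contributes no new elements.
import Mathlib
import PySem

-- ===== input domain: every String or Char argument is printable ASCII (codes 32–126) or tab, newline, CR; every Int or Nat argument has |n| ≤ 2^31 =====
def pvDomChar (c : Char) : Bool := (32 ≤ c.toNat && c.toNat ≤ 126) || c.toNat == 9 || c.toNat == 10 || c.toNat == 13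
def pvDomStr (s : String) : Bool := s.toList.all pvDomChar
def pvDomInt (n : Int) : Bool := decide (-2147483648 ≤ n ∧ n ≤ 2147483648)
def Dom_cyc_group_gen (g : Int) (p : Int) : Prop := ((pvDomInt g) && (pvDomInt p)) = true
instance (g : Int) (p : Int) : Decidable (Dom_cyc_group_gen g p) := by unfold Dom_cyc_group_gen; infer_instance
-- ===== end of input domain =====

-- B replaces the per-index pow(g,i,p) enumeration of all p-1 powers by an incremental
-- cur = cur*g % p orbit walk that breaks at the first repeated value (faster; same count).


-- ===== PORT A =====
def cyc_group_gen (g : Int) (p : Int) : Int :=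
  let E : List Int := []
  let my_set : PySem.Set Int := PySem.Set.ofList E
  let my_set := (PySem.List.pyRange 1 p 1).foldl
      (fun s i => PySem.Set.add s (PySem.Int.powMod g i.toNat p)) my_set
  (my_set.length : Int)

-- ===== PORT B =====
def cycAltLoop (g : Int) (p : Int) : List Int → Int → PySem.Set Int → PySem.Set Int
  | [], _, seen => seen
  | _ :: rest, cur, seen =>
    let cur' := PySem.Int.mod (cur * g) p
    if PySem.Set.contains seen cur' then seen
    else cycAltLoop g p rest cur' (PySem.Set.add seen cur')

def cyc_group_gen_alt (g : Int) (p : Int) : Int :=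
  ((cycAltLoop g p (PySem.List.pyRange 1 p 1) 1 PySem.Set.empty).length : Int)

-- ===== PRECONDITION & SPEC =====
def Spec_cyc_group_gen (g : Int) (p : Int) (out : Int) : Prop := out = cyc_group_gen_alt g p
instance (g : Int) (p : Int) (out : Int) : Decidable (Spec_cyc_group_gen g p out) := by unfold Spec_cyc_group_gen; infer_instance

-- ===== CLAIM (what is proved, stated in full; the proofs are below) =====
def Claim_equal_cyc_group_gen : Prop := ∀ (g : Int) (p : Int), Dom_cyc_group_gen g p → Spec_cyc_group_gen g p (cyc_group_gen g p)

-- ===== LEMMAS AND PROOFS =====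

-- f k = g^k mod p (Python mod), the k-th orbit value
def pvF (g p : Int) (k : Nat) : Int := PySem.Int.mod (g ^ k) p
-- the first k orbit values f 1, …, f k in order
def pvPref (g p : Int) (k : Nat) : List Int := (List.range k).map (fun j => pvF g p (j+1))

theorem pvF_shift (g p : Int) (hp : 0 < p) (a t : Nat) :
    pvF g p (a + t) = PySem.Int.mod (pvF g p a * g ^ t) p := by
  simp only [pvF, PySem.Int.mod_eq_emod_of_pos hp, pow_add]
  conv_lhs => rw [Int.mul_emod]
  conv_rhs => rw [Int.mul_emod, Int.emod_emod_of_dvd _ dvd_rfl]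

theorem pvF_step (g p : Int) (hp : 0 < p) (k : Nat) :
    pvF g p (k + 1) = PySem.Int.mod (pvF g p k * g) p := by
  have := pvF_shift g p hp k 1
  simpa using this

-- membership in the prefix
theorem mem_pvPref {g p : Int} {k : Nat} {x : Int} :
    x ∈ pvPref g p k ↔ ∃ j, j < k ∧ x = pvF g p (j+1) := by
  simp only [pvPref, List.mem_map, List.mem_range]
  constructor
  · rintro ⟨j, hj, rfl⟩; exact ⟨j, hj, rfl⟩
  · rintro ⟨j, hj, rfl⟩; exact ⟨j, hj, rfl⟩

-- once the orbit repeats, every positive power lies in the prefix before the repeat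
theorem pvF_repeat (g p : Int) (hp : 0 < p) (i k : Nat) (hik : i < k)
    (heq : pvF g p (i+1) = pvF g p (k+1)) :
    ∀ m, 1 ≤ m → pvF g p m ∈ pvPref g p k := by
  intro m
  induction m using Nat.strong_induction_on with
  | _ m ih =>
    intro hm
    by_cases hmk : m ≤ k
    · exact mem_pvPref.mpr ⟨m - 1, by omega, by congr 1; omega⟩
    · -- m ≥ k + 1 : fold back by k - i
      have e1 : pvF g p m = PySem.Int.mod (pvF g p (k+1) * g ^ (m - k - 1)) p := by
        rw [← pvF_shift g p hp (k+1) (m - k - 1)]; congr 1; omega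
      have h1 : pvF g p m = pvF g p ((i + 1) + (m - k - 1)) := by
        rw [e1, ← heq, ← pvF_shift g p hp (i+1) (m - k - 1)]
      rw [h1]
      exact ih ((i + 1) + (m - k - 1)) (by omega) (by omega)

-- updating a set with elements it already has is a no-op
theorem update_of_subset {s : PySem.Set Int} : ∀ {ys : List Int},
    (∀ y ∈ ys, y ∈ s) → PySem.Set.update s ys = s := by
  intro ys
  induction ys generalizing s with
  | nil => intro _; rfl
  | cons y ys ih =>
    intro h
    have hy : y ∈ s := h y (by simp)
    have hc : PySem.Set.contains s y = true := (PySem.Set.contains_iff s y).mpr hy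
    have : PySem.Set.add s y = s := by
      simp only [PySem.Set.add, hc, if_true]
    show PySem.Set.update (PySem.Set.add s y) ys = s
    rw [this]
    exact ih (fun z hz => h z (List.mem_cons_of_mem _ hz))

theorem ofList_append (xs ys : List Int) :
    PySem.Set.ofList (xs ++ ys) = PySem.Set.update (PySem.Set.ofList xs) ys := by
  rw [PySem.Set.ofList_eq_foldl, PySem.Set.ofList_eq_foldl, List.foldl_append]
  rfl

theorem pvPref_split (g p : Int) (k m : Nat) :
    pvPref g p (k + m) = pvPref g p k ++ (List.range m).map (fun t => pvF g p (k + t + 1)) := by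
  simp only [pvPref, List.range_add, List.map_append, List.map_map]
  congr 1

-- if the orbit repeats within the first k+1 steps, all longer prefixes collapse to pvPref k
theorem ofList_pref_stable (g p : Int) (hp : 0 < p) (k m : Nat)
    (hrep : pvF g p (k+1) ∈ pvPref g p k) :
    PySem.Set.ofList (pvPref g p (k + m)) = PySem.Set.ofList (pvPref g p k) := by
  obtain ⟨i, hik, hi⟩ := mem_pvPref.mp hrep
  rw [pvPref_split g p k m, ofList_append]
  apply update_of_subset
  intro y hy
  rw [PySem.Set.mem_ofList]
  obtain ⟨t, _, rfl⟩ := List.mem_map.mp hy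
  have := pvF_repeat g p hp i k hik hi.symm (k + t + 1) (by omega)
  exact this

-- the B loop invariant: starting after k clean steps it produces the set of all orbit values
theorem cycAltLoop_inv (g p : Int) (hp : 0 < p) :
    ∀ (l : List Int) (k : Nat),
      cycAltLoop g p l (pvF g p k) (PySem.Set.ofList (pvPref g p k))
        = PySem.Set.ofList (pvPref g p (k + l.length)) := by
  intro l
  induction l with
  | nil => intro k; simp [cycAltLoop]
  | cons x rest ih =>
    intro k
    rw [cycAltLoop]
    rw [← pvF_step g p hp k]
    by_cases hc : PySem.Set.contains (PySem.Set.ofList (pvPref g p k)) (pvF g p (k+1)) = true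
    · rw [if_pos hc]
      have hrep : pvF g p (k+1) ∈ pvPref g p k := by
        rw [← PySem.Set.mem_ofList]; exact (PySem.Set.contains_iff _ _).mp hc
      rw [ofList_pref_stable g p hp k (x :: rest).length hrep]
    · rw [if_neg hc]
      have hadd : PySem.Set.add (PySem.Set.ofList (pvPref g p k)) (pvF g p (k+1))
          = PySem.Set.ofList (pvPref g p (k+1)) := by
        have : pvPref g p (k+1) = pvPref g p k ++ [pvF g p (k+1)] := by
          simp [pvPref, List.range_succ]
        rw [this, ofList_append]
        rfl
      have hlen : k + (x :: rest).length = (k + 1) + rest.length := by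
        simp [List.length_cons]; omega
      rw [hadd, hlen, ih (k+1)]

-- the A loop computes ofList of the same prefix
theorem cyc_group_gen_eval (g p : Int) :
    cyc_group_gen g p = ((PySem.Set.ofList (pvPref g p (p-1).toNat)).length : Int) := by
  show ((((PySem.List.pyRange 1 p 1).foldl
      (fun s i => PySem.Set.add s (PySem.Int.powMod g i.toNat p))
      (PySem.Set.ofList ([] : List Int))).length : Nat) : Int) = _
  rw [PySem.List.pyRange_one, List.foldl_map]
  have hfun : (fun (s : PySem.Set Int) (k : Nat) => PySem.Set.add s (PySem.Int.powMod g (1 + (k:Int)).toNat p))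
      = fun s k => PySem.Set.add s (pvF g p (k+1)) := by
    funext s k
    have : (1 + (k:Int)).toNat = k + 1 := by omega
    simp [this, PySem.Int.powMod, pvF]
  rw [hfun, ← PySem.Set.update_map_eq_foldl_add]
  have h0 : PySem.Set.ofList ([] : List Int) = ([] : PySem.Set Int) := rfl
  rw [h0, PySem.Set.update_nil_left]
  rfl

-- ===== VERDICT (by name: the statement is the Claim_ definition above) =====
theorem cyc_group_gen_spec : Claim_equal_cyc_group_gen := by
  intro g p _
  unfold Spec_cyc_group_gen
  rw [cyc_group_gen_eval]
  unfold cyc_group_gen_alt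
  by_cases hp2 : 2 ≤ p
  · have hp : 0 < p := by omega
    have hf0 : pvF g p 0 = 1 := by
      simp only [pvF, pow_zero, PySem.Int.mod_eq_emod_of_pos hp]
      exact Int.emod_eq_of_lt (by omega) (by omega)
    have key := cycAltLoop_inv g p hp (PySem.List.pyRange 1 p 1) 0
    rw [hf0] at key
    have h0 : PySem.Set.ofList (pvPref g p 0) = PySem.Set.empty := rfl
    rw [h0] at key
    rw [key]
    have hlen : (PySem.List.pyRange 1 p 1).length = (p - 1).toNat := by
      simp [PySem.List.length_pyRange_one]
    rw [hlen]
    simp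
  · -- p ≤ 1 : the range is empty, both sides are 0
    have hn : (p - 1).toNat = 0 := by omega
    rw [PySem.List.pyRange_one, hn]
    simp [pvPref, cycAltLoop, PySem.Set.empty, PySem.Set.ofList]
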